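-- pv_equiv track=rewrite | github.com/krongi/chatdock | app.py | breakdown_prompt
-- ===== SOURCE A (Python) =====
-- def breakdown_prompt(text_prompt_string):
--     text_prompt_string_list = text_prompt_string.splitlines()
--     secondary_string_list = []
--     for item in text_prompt_string_list:
--         if item != '':
--             secondary_string_list.append(item)
--     for item in secondary_string_list:
--         item.strip()
--     third_string_list = []
--     for item in secondary_string_list:
--         for chunk in item.split('.'):
--             third_string_list.append(chunk)
--     final_string_list = []
--     for item in third_string_list:
--         for chunk in item.split(','):
--             final_string_list.append(chunk)
--     return final_string_list
-- ===== SOURCE B (Python) =====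
-- def breakdown_prompt(text_prompt_string):
--     # single character-level pass per non-empty line: cut at each period or comma
--     final_string_list = []
--     for line in text_prompt_string.splitlines():
--         if line != '':
--             cur = []
--             for ch in line:
--                 if ch == '.' or ch == ',':
--                     final_string_list.append(''.join(cur))
--                     cur = []
--                 else:
--                     cur.append(ch)
--             final_string_list.append(''.join(cur))
--     return final_string_list
-- ===== Notes on version B (the rewrite author's own statement) =====
-- stated objective: alternative
-- what changed: Replaces A's four list passes (filter, dead strip loop, split-by-period pass over all lines, split-by-comma pass over all chunks) with one character-level scan per non-empty line that emits a chunk at each period or comma.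
import Mathlib
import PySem

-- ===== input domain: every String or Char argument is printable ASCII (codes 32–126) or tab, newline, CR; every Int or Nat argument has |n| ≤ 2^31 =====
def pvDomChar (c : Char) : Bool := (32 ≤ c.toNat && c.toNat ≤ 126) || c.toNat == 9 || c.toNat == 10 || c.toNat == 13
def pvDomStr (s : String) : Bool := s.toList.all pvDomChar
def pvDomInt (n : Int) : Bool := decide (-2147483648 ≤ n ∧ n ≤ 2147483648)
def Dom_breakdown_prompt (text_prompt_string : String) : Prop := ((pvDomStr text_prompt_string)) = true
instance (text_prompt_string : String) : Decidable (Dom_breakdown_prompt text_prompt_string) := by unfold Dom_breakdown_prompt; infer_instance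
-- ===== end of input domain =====

-- B replaces A's four list passes (filter, dead strip loop, split-by-'.', split-by-',')
-- with one character-level scan per non-empty line; same return value, alternative structure.

-- ===== PORT A =====
def breakdown_prompt (text_prompt_string : String) : List String :=
  let text_prompt_string_list := PySem.Str.splitlines text_prompt_string
  let secondary_string_list :=
    text_prompt_string_list.foldl
      (fun acc item => if (item != "") = true then acc ++ [item] else acc) []
  -- A's 'for item in …: item.strip()' discards each result; nothing to port
  let third_string_list :=
    secondary_string_list.foldl
      (fun acc item => acc ++ (PySem.Chars.splitOn item.toList ['.']).map String.ofList) []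
  let final_string_list :=
    third_string_list.foldl
      (fun acc item => acc ++ (PySem.Chars.splitOn item.toList [',']).map String.ofList) []
  final_string_list

-- ===== PORT B =====
-- inner character loop of Source B: cur is the reversed pending chunk
def pvScan (cur : List Char) : List Char → List String
  | [] => [String.ofList cur.reverse]
  | c :: rest =>
    if c = '.' ∨ c = ',' then String.ofList cur.reverse :: pvScan [] rest
    else pvScan (c :: cur) rest

def breakdown_prompt_alt (text_prompt_string : String) : List String :=
  (PySem.Str.splitlines text_prompt_string).foldl
    (fun acc line => if (line != "") = true then acc ++ pvScan [] line.toList else acc) []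

-- ===== PRECONDITION & SPEC =====
def Spec_breakdown_prompt (text_prompt_string : String) (out : List String) : Prop := out = breakdown_prompt_alt text_prompt_string
instance (text_prompt_string : String) (out : List String) : Decidable (Spec_breakdown_prompt text_prompt_string out) := by unfold Spec_breakdown_prompt; infer_instance

-- ===== CLAIM (what is proved, stated in full; the proofs are below) =====
def Claim_equal_breakdown_prompt : Prop := ∀ (text_prompt_string : String), Dom_breakdown_prompt text_prompt_string → Spec_breakdown_prompt text_prompt_string (breakdown_prompt text_prompt_string)

-- ===== LEMMAS AND PROOFS =====

-- natural recursion for splitting a char list on a single delimiter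
def pvSplitOne (d : Char) : List Char → List (List Char)
  | [] => [[]]
  | c :: rest =>
    if c = d then [] :: pvSplitOne d rest
    else (pvSplitOne d rest).modifyHead (c :: ·)

lemma pvSplitOne_ne_nil (d : Char) (l : List Char) : pvSplitOne d l ≠ [] := by
  induction l with
  | nil => simp [pvSplitOne]
  | cons c rest ih =>
    simp only [pvSplitOne]
    split_ifs
    · simp
    · cases h : pvSplitOne d rest with
      | nil => exact absurd h ih
      | cons a t => simp

lemma pvModifyHead_id {α : Type} (l : List α) : l.modifyHead (fun x => x) = l := by
  cases l <;> simp

lemma pvFlatMap_if (p : String → Bool) (g : String → List String) (l : List String) :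
    l.flatMap (fun x => if (p x) = true then g x else []) = (l.filter p).flatMap g := by
  induction l with
  | nil => simp
  | cons hd tl ih =>
    by_cases h : p hd = true <;> simp [h, ih]

lemma pvSplitOn_go_eq (d : Char) :
    ∀ (fuel : Nat) (l cur : List Char) (acc : List (List Char)), l.length < fuel →
      PySem.Chars.splitOn.go [d] fuel l cur acc
        = acc.reverse ++ (pvSplitOne d l).modifyHead (cur.reverse ++ ·) := by
  intro fuel
  induction fuel with
  | zero => intro l cur acc h; omega
  | succ f ih =>
    intro l cur acc h
    cases l with
    | nil =>
      rw [PySem.Chars.splitOn.go.eq_2 [d] (f + 1) cur acc (by omega)]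
      simp [pvSplitOne]
    | cons c rest =>
      rw [show f + 1 = Nat.succ f from rfl, PySem.Chars.splitOn.go.eq_3]
      by_cases hc : c = d
      · subst hc
        rw [if_pos (by simp [List.isPrefixOf])]
        rw [show List.drop ([c].length) (c :: rest) = rest from rfl]
        rw [ih rest [] (cur.reverse :: acc) (by simpa using Nat.lt_of_succ_lt_succ h)]
        simp [pvSplitOne, pvModifyHead_id]
      · rw [if_neg (by simp [List.isPrefixOf]; exact fun h' => hc h'.symm)]
        rw [ih rest (c :: cur) acc (by simpa using Nat.lt_of_succ_lt_succ h)]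
        obtain ⟨a, t, ht⟩ := List.exists_cons_of_ne_nil (pvSplitOne_ne_nil d rest)
        simp [pvSplitOne, hc, ht]

lemma pvSplitOn_eq (d : Char) (l : List Char) :
    PySem.Chars.splitOn l [d] = pvSplitOne d l := by
  unfold PySem.Chars.splitOn
  rw [pvSplitOn_go_eq d (l.length + 1) l [] [] (by omega)]
  simp [pvModifyHead_id]

-- the composed split of one line, at char level
def pvBoth (l : List Char) : List (List Char) :=
  (pvSplitOne '.' l).flatMap (pvSplitOne ',')

lemma pvBoth_ne_nil (l : List Char) : pvBoth l ≠ [] := by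
  unfold pvBoth
  obtain ⟨a, t, ht⟩ := List.exists_cons_of_ne_nil (pvSplitOne_ne_nil '.' l)
  obtain ⟨b, u, hu⟩ := List.exists_cons_of_ne_nil (pvSplitOne_ne_nil ',' a)
  simp [ht, hu]

lemma pvBoth_cons (c : Char) (rest : List Char) :
    pvBoth (c :: rest)
      = if c = '.' ∨ c = ',' then [] :: pvBoth rest
        else (pvBoth rest).modifyHead (c :: ·) := by
  by_cases hd : c = '.'
  · subst hd
    simp [pvBoth, pvSplitOne]
  · obtain ⟨a, t, ht⟩ := List.exists_cons_of_ne_nil (pvSplitOne_ne_nil '.' rest)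
    by_cases hc : c = ','
    · subst hc
      simp [pvBoth, pvSplitOne, ht, hd]
    · simp only [pvBoth, pvSplitOne, ht, if_neg hd]
      obtain ⟨b, u, hu⟩ := List.exists_cons_of_ne_nil (pvSplitOne_ne_nil ',' a)
      simp [pvSplitOne, hu, hc, hd]

lemma pvScan_eq :
    ∀ (l cur : List Char),
      pvScan cur l = ((pvBoth l).modifyHead (cur.reverse ++ ·)).map String.ofList := by
  intro l
  induction l with
  | nil => intro cur; simp [pvScan, pvBoth, pvSplitOne]
  | cons c rest ih =>
    intro cur
    rw [pvBoth_cons]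
    by_cases hc : c = '.' ∨ c = ','
    · simp only [pvScan, if_pos hc, ih [], List.reverse_nil, List.modifyHead_cons,
        List.nil_append, List.map_cons]
      simp [pvModifyHead_id]
    · obtain ⟨a, t, ht⟩ := List.exists_cons_of_ne_nil (pvBoth_ne_nil rest)
      simp [pvScan, hc, ih (c :: cur), ht]

-- one line of A (split by '.', then every chunk by ',') equals one pvScan pass of B
lemma pvLine_eq (item : String) :
    ((PySem.Chars.splitOn item.toList ['.']).map String.ofList).flatMap
        (fun u => (PySem.Chars.splitOn u.toList [',']).map String.ofList)
      = pvScan [] item.toList := by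
  rw [pvScan_eq]
  simp only [List.reverse_nil, List.nil_append, pvModifyHead_id]
  rw [pvSplitOn_eq, List.flatMap_map]
  unfold pvBoth
  rw [List.map_flatMap]
  exact List.flatMap_congr (fun v _ => by rw [String.toList_ofList, pvSplitOn_eq])

-- ===== VERDICT (by name: the statement is the Claim_ definition above) =====
theorem breakdown_prompt_spec : Claim_equal_breakdown_prompt := by
  intro s _
  unfold Spec_breakdown_prompt breakdown_prompt breakdown_prompt_alt
  simp only [PySem.List.foldl_append_if, PySem.List.foldl_append_eq_flatMap,
    List.nil_append, List.map_id']
  -- both sides become a flatMap over the non-empty lines; rewrite B's fold the same way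
  rw [show (fun (acc : List String) (line : String) =>
        if (line != "") = true then acc ++ pvScan [] line.toList else acc)
      = (fun acc line => acc ++ if (line != "") = true then pvScan [] line.toList else [])
    from funext fun acc => funext fun line => by split_ifs <;> simp]
  rw [PySem.List.foldl_append_eq_flatMap, List.nil_append, List.flatMap_assoc,
    pvFlatMap_if]
  exact List.flatMap_congr (fun item _ => pvLine_eq item)
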